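-- pv_equiv track=rewrite | github.com/huy29433/IntroductoryPythonCourse | Woche7-Bonus/Aufgabe_5.py | findMatchesVersion1
-- ===== SOURCE A (Python) =====
-- def findMatchesVersion1(listOfSocks):
--     matches = []
--     for i in range(len(listOfSocks)):
--         foundIndex = -1
--         for j in range(len(listOfSocks)):
--             if i == j:
--                 continue
--             if listOfSocks[i] == listOfSocks[j]:
--                 foundIndex = j
--                 break
--         matches.append(foundIndex)
--     return matches
-- ===== SOURCE B (Python) =====
-- def findMatchesVersion1(listOfSocks):
--     # One pass builds, per value, its first two occurrence indices; second pass reads answers.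
--     first2 = {}
--     for i, v in enumerate(listOfSocks):
--         if v not in first2:
--             first2[v] = (i, None)
--         else:
--             f, s = first2[v]
--             if s is None:
--                 first2[v] = (f, i)
--     matches = []
--     for i, v in enumerate(listOfSocks):
--         f, s = first2[v]
--         if s is None:
--             matches.append(-1)
--         elif i == f:
--             matches.append(s)
--         else:
--             matches.append(f)
--     return matches
-- ===== Notes on version B (the rewrite author's own statement) =====
-- stated objective: faster
-- what changed: Replaces the quadratic nested scan by a single pass that records the first two occurrence indices of each value in a hash map, then answers each index from that map.
import Mathlib
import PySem

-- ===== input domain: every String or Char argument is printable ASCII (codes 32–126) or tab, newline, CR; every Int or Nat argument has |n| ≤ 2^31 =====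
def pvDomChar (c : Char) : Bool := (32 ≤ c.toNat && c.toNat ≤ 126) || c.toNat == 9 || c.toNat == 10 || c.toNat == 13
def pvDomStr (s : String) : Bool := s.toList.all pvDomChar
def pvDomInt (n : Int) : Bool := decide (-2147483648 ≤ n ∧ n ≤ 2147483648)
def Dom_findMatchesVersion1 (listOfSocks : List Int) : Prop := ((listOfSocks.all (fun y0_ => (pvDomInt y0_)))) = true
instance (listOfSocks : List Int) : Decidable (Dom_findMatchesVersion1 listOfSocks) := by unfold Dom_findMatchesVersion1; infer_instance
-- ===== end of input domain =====

-- B replaces A's O(n^2) nested scan by one pass recording the first two occurrence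
-- indices of each value in a dict; equal return value on every input (objective: faster).

-- ===== PORT A =====
-- inner loop of A: first index j ≠ i with value v, scanning the enumerated list; -1 if none
def pvInnerA (v i : Int) : List (Int × Int) → Int
  | [] => -1
  | (j, x) :: rest => if i = j then pvInnerA v i rest
      else if v = x then j else pvInnerA v i rest

def findMatchesVersion1 (listOfSocks : List Int) : List Int :=
  let en := PySem.List.enumerate listOfSocks
  en.map (fun p => pvInnerA p.2 p.1 en)

-- ===== PORT B =====
-- one step of B's first loop: record first / second occurrence index of the value
def pvStep (d : PySem.Dict Int (Int × Option Int)) (p : Int × Int) :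
    PySem.Dict Int (Int × Option Int) :=
  match d.get? p.2 with
  | none => d.insert p.2 (p.1, none)
  | some (f, none) => d.insert p.2 (f, some p.1)
  | some (_, some _) => d

def findMatchesVersion1_alt (listOfSocks : List Int) : List Int :=
  let en := PySem.List.enumerate listOfSocks
  let d := en.foldl pvStep PySem.Dict.empty
  en.map (fun p =>
    match d.get? p.2 with
    | some (_f, none) => -1
    | some (f, some s) => if p.1 = f then s else f
    | none => -1)   -- unreachable: every enumerated value is a key of d

-- ===== PRECONDITION & SPEC =====
def Spec_findMatchesVersion1 (listOfSocks : List Int) (out : List Int) : Prop := out = findMatchesVersion1_alt listOfSocks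
instance (listOfSocks : List Int) (out : List Int) : Decidable (Spec_findMatchesVersion1 listOfSocks out) := by unfold Spec_findMatchesVersion1; infer_instance

-- ===== CLAIM (what is proved, stated in full; the proofs are below) =====
def Claim_equal_findMatchesVersion1 : Prop := ∀ (listOfSocks : List Int), Dom_findMatchesVersion1 listOfSocks → Spec_findMatchesVersion1 listOfSocks (findMatchesVersion1 listOfSocks)

-- ===== LEMMAS AND PROOFS =====

-- occurrence indices of value v in an enumerated list, in order
def pvOcc (v : Int) (l : List (Int × Int)) : List Int :=
  (l.filter (fun p => decide (v = p.2))).map (·.1)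

-- first element ≠ i of a list of indices, -1 if none
def pvFirstNe (i : Int) : List Int → Int
  | [] => -1
  | a :: r => if i = a then pvFirstNe i r else a

lemma pvInnerA_eq_firstNe (v i : Int) (l : List (Int × Int)) :
    pvInnerA v i l = pvFirstNe i (pvOcc v l) := by
  induction l with
  | nil => simp [pvInnerA, pvOcc, pvFirstNe]
  | cons p rest ih =>
    obtain ⟨j, x⟩ := p
    by_cases hv : v = x
    · subst hv
      by_cases hij : i = j
      · subst hij; simp [pvInnerA, pvOcc, pvFirstNe]; exact ih
      · simp [pvInnerA, pvOcc, pvFirstNe, hij]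
    · by_cases hij : i = j
      · subst hij; simp [pvInnerA, pvOcc, hv, ih]
      · simp [pvInnerA, pvOcc, hv, hij, ih]

-- how B's dict entry for v is extended by the occurrences in l
def pvComb : Option (Int × Option Int) → List Int → Option (Int × Option Int)
  | none, occ => match occ with | [] => none | a :: r => some (a, r.head?)
  | some (f, none), occ => some (f, occ.head?)
  | some (f, some s), _ => some (f, some s)

lemma pvFold_inv (l : List (Int × Int)) :
    ∀ (d : PySem.Dict Int (Int × Option Int)) (v : Int),
    (l.foldl pvStep d).get? v = pvComb (d.get? v) (pvOcc v l) := by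
  induction l with
  | nil => intro d v; cases h : d.get? v with
    | none => simp [pvOcc, pvComb, h]
    | some fs => obtain ⟨f, s⟩ := fs; cases s <;> simp [pvOcc, pvComb, h]
  | cons p rest ih =>
    intro d v
    obtain ⟨j, x⟩ := p
    simp only [List.foldl_cons]
    rw [ih]
    by_cases hv : v = x
    · subst hv
      cases h : d.get? v with
      | none =>
        simp [pvStep, h, pvOcc, pvComb]
      | some fs =>
        obtain ⟨f, s⟩ := fs
        cases s with
        | none =>
          simp [pvStep, h, pvOcc, pvComb]
        | some s' =>
          simp [pvStep, h, pvOcc, pvComb]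
    · have hstep : (pvStep d (j, x)).get? v = d.get? v := by
        unfold pvStep
        cases h : d.get? x with
        | none => simp [PySem.Dict.get?_insert, hv]
        | some fs =>
          obtain ⟨f, s⟩ := fs
          cases s <;> simp [PySem.Dict.get?_insert, hv]
      rw [hstep]
      have : pvOcc v ((j, x) :: rest) = pvOcc v rest := by
        simp [pvOcc, hv]
      rw [this]

lemma pvOcc_nodup (v : Int) (xs : List Int) :
    (pvOcc v (PySem.List.enumerate xs)).Nodup := by
  have hp : (PySem.List.enumerate xs).Pairwise (fun p q => p.1 < q.1) :=
    PySem.List.pairwise_lt_enumerate xs 0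
  have hf : ((PySem.List.enumerate xs).filter (fun p => decide (v = p.2))).Pairwise
      (fun p q => p.1 < q.1) := List.Pairwise.sublist List.filter_sublist hp
  have hm : (pvOcc v (PySem.List.enumerate xs)).Pairwise (· < ·) := by
    unfold pvOcc
    exact (List.pairwise_map).mpr hf
  exact hm.imp (fun h => ne_of_lt h)

lemma pv_mem_occ (p : Int × Int) (l : List (Int × Int)) (hp : p ∈ l) :
    p.1 ∈ pvOcc p.2 l := by
  unfold pvOcc
  exact List.mem_map_of_mem (List.mem_filter.mpr ⟨hp, by simp⟩)

lemma pv_pointwise (xs : List Int) (p : Int × Int)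
    (hp : p ∈ PySem.List.enumerate xs) :
    pvInnerA p.2 p.1 (PySem.List.enumerate xs) =
      (match (((PySem.List.enumerate xs).foldl pvStep PySem.Dict.empty).get? p.2) with
        | some (_f, none) => -1
        | some (f, some s) => if p.1 = f then s else f
        | none => -1) := by
  set en := PySem.List.enumerate xs with hen
  have hocc : p.1 ∈ pvOcc p.2 en := pv_mem_occ p en hp
  have hget : ((en.foldl pvStep PySem.Dict.empty).get? p.2) =
      pvComb none (pvOcc p.2 en) := by
    rw [pvFold_inv]; simp
  rw [pvInnerA_eq_firstNe, hget]
  have hnd : (pvOcc p.2 en).Nodup := by rw [hen]; exact pvOcc_nodup p.2 xs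
  cases hlist : pvOcc p.2 en with
  | nil => rw [hlist] at hocc; simp at hocc
  | cons f rest =>
    rw [hlist] at hocc hnd
    by_cases hif : p.1 = f
    · subst hif
      have hnotin : p.1 ∉ rest := (List.nodup_cons.mp hnd).1
      cases rest with
      | nil => simp [pvComb, pvFirstNe]
      | cons a r =>
        have ha : p.1 ≠ a := by intro h; exact hnotin (h ▸ List.mem_cons_self ..)
        simp [pvComb, pvFirstNe, ha]
    · have hmem : p.1 ∈ rest := by
        rcases List.mem_cons.mp hocc with h | h
        · exact absurd h hif
        · exact h
      cases rest with
      | nil => simp at hmem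
      | cons a r => simp [pvComb, pvFirstNe, hif]

-- ===== VERDICT (by name: the statement is the Claim_ definition above) =====
theorem findMatchesVersion1_spec : Claim_equal_findMatchesVersion1 := by
  intro xs _
  unfold Spec_findMatchesVersion1 findMatchesVersion1 findMatchesVersion1_alt
  exact List.map_congr_left (fun p hp => pv_pointwise xs p hp)
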